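-- pv_equiv track=rewrite | github.com/MichielFeys/Informatica5 | Toets/Snake.py | laatste_levende_positie
-- ===== SOURCE A (Python) =====
-- def beweeg(coordinaat, richting):
--     for i in range(0, len(coordinaat)):
--         x_coordinaat = coordinaat[0]
--         y_coordinaat = coordinaat[1]
--         if richting == '<':
--             x_coordinaat -= 1
--         elif richting == '>':
--             x_coordinaat += 1
--         elif richting == '^':
--             y_coordinaat += 1
--         elif richting == 'v':
--             y_coordinaat -= 1
--         return x_coordinaat, y_coordinaat
--
-- def teruggekeerd(beweging):
--     for i in range(0, len(beweging)):
--         if beweging[0] == '<' and beweging[1] == '>' or beweging[0] == '>' and beweging[1] == '<':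
--             return True
--         elif beweging[0] == 'v' and beweging[1] == '^' or beweging[0] == '^' and beweging[1] == 'v':
--             return True
--         else:
--             return False
--
-- def laatste_levende_positie(bewegingen):
--     for i in range(0, len(bewegingen)):
--         x, y = beweeg((0, 0), bewegingen[i])
--         i = 1
--         while i < len(bewegingen) and not teruggekeerd([bewegingen[i-1], bewegingen[i]]):
--             x, y = beweeg((x, y) , bewegingen[i])
--             i += 1
--         return i, x, y
-- ===== SOURCE B (Python) =====
-- _REV = {('<', '>'), ('>', '<'), ('^', 'v'), ('v', '^')}
-- _DELTA = {'<': (-1, 0), '>': (1, 0), '^': (0, 1), 'v': (0, -1)}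
--
-- def _stop(bewegingen):
--     """Index of the first reversing adjacent pair, or len(bewegingen) if none."""
--     for i in range(1, len(bewegingen)):
--         if (bewegingen[i - 1], bewegingen[i]) in _REV:
--             return i
--     return len(bewegingen)
--
-- def laatste_levende_positie(bewegingen):
--     if not bewegingen:
--         return None
--     s = _stop(bewegingen)
--     x, y = 0, 0
--     for m in bewegingen[:s]:
--         dx, dy = _DELTA.get(m, (0, 0))
--         x, y = x + dx, y + dy
--     return s, x, y
-- ===== Notes on version B (the rewrite author's own statement) =====
-- stated objective: simpler
-- what changed: A interleaves moving and reverse-checking in one index-driven while loop over per-step helper calls; B first scans for the first reversing adjacent pair (or the length) and then sums per-move deltas from a dict over that prefix - fewer per-step function calls and comparisons.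
-- outside the precondition, e.g. on laatste_levende_positie([]): A returns None, B returns None
import Mathlib
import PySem

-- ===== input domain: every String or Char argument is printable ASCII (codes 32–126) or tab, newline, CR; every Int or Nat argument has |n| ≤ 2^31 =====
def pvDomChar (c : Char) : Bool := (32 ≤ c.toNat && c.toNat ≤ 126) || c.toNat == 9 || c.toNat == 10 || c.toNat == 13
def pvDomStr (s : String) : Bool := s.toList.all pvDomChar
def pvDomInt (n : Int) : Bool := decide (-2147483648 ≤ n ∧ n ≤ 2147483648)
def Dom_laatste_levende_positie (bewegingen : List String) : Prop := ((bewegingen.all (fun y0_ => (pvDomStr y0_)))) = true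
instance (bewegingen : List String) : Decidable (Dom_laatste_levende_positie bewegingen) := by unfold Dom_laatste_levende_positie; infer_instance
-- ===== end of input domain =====

-- B replaces A's single interleaved while-loop (move + reverse-check per step) by a scan for the
-- first reversing adjacent pair followed by a fold summing the deltas of that prefix: simpler decomposition, same O(n) cost.
-- Pre_ excludes only the empty list, on which Python A returns None (no Int triple).


-- ===== PORT A =====
-- beweeg: the Python 'for i in range(0, len(coordinaat))' returns during its first
-- iteration (coordinaat is always a 2-tuple here), so the port is that first iteration's body.
def beweegA (coordinaat : Int × Int) (richting : String) : Int × Int :=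
  let x := coordinaat.1
  let y := coordinaat.2
  if richting = "<" then (x - 1, y)
  else if richting = ">" then (x + 1, y)
  else if richting = "^" then (x, y + 1)
  else if richting = "v" then (x, y - 1)
  else (x, y)

-- teruggekeerd: called on the 2-element list [bewegingen[i-1], bewegingen[i]]; its
-- 'for' also returns during the first iteration, so the port takes the two elements.
def teruggekeerdA (a b : String) : Bool :=
  if (a = "<" ∧ b = ">") ∨ (a = ">" ∧ b = "<") then true
  else if (a = "v" ∧ b = "^") ∨ (a = "^" ∧ b = "v") then true
  else false

-- the inner 'while i < len(bewegingen) and not teruggekeerd(...)'; indices are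
-- nonnegative and in range whenever read, so bewegingen[j] is ported as bew[j]?.getD "".
def loopA (bew : List String) (x y : Int) (i : Nat) : Int × Int × Int :=
  if _h : i < bew.length ∧ teruggekeerdA (bew[i - 1]?.getD "") (bew[i]?.getD "") = false then
    let p := beweegA (x, y) (bew[i]?.getD "")
    loopA bew p.1 p.2 (i + 1)
  else ((i : Int), x, y)
termination_by bew.length - i
decreasing_by omega

-- the outer 'for i in range(0, len(bewegingen))' returns during its first iteration
-- (i = 0); on [] Python returns None (no value of the declared type) — excluded by Pre_.
def laatste_levende_positie (bewegingen : List String) : Int × Int × Int :=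
  match bewegingen with
  | [] => (0, 0, 0)
  | m :: _ =>
    let p := beweegA (0, 0) m
    loopA bewegingen p.1 p.2 1

-- ===== PORT B =====
def isRevB (a b : String) : Bool :=
  decide ((a, b) ∈ [("<", ">"), (">", "<"), ("^", "v"), ("v", "^")])

def deltaB (m : String) : Int × Int :=
  PySem.Dict.getD (PySem.Dict.ofList [("<", ((-1 : Int), (0 : Int))), (">", (1, 0)), ("^", (0, 1)), ("v", (0, -1))]) m (0, 0)

-- _stop: first index i ≥ 1 whose pair (bew[i-1], bew[i]) reverses, else the length
def stopB : List String → Nat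
  | [] => 0
  | [_] => 1
  | a :: b :: rest => if isRevB a b then 1 else 1 + stopB (b :: rest)

def laatste_levende_positie_alt (bewegingen : List String) : Int × Int × Int :=
  let s := stopB bewegingen
  let p := (bewegingen.take s).foldl
    (fun (q : Int × Int) m => (q.1 + (deltaB m).1, q.2 + (deltaB m).2)) (0, 0)
  ((s : Int), p.1, p.2)

-- ===== PRECONDITION & SPEC =====
-- Pre_ excludes only the empty list, on which Python A returns None instead of a 3-tuple of ints.
def Pre_laatste_levende_positie (bewegingen : List String) : Prop := bewegingen ≠ []
instance (bewegingen : List String) : Decidable (Pre_laatste_levende_positie bewegingen) := by unfold Pre_laatste_levende_positie; infer_instance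
def pvWitness_laatste_levende_positie : List String := ["<", "^", ">"]
def Spec_laatste_levende_positie (bewegingen : List String) (out : Int × Int × Int) : Prop := out = laatste_levende_positie_alt bewegingen
instance (bewegingen : List String) (out : Int × Int × Int) : Decidable (Spec_laatste_levende_positie bewegingen out) := by unfold Spec_laatste_levende_positie; infer_instance

-- ===== CLAIM (what is proved, stated in full; the proofs are below) =====
def Claim_equal_laatste_levende_positie : Prop := ∀ (bewegingen : List String), Dom_laatste_levende_positie bewegingen → Pre_laatste_levende_positie bewegingen → Spec_laatste_levende_positie bewegingen (laatste_levende_positie bewegingen)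

-- ===== LEMMAS AND PROOFS =====
def sumB (l : List String) : Int × Int :=
  l.foldl (fun (q : Int × Int) m => (q.1 + (deltaB m).1, q.2 + (deltaB m).2)) (0, 0)

theorem terug_eq_isRev (a b : String) : teruggekeerdA a b = isRevB a b := by
  simp only [teruggekeerdA, isRevB, List.mem_cons, List.not_mem_nil, or_false, Prod.mk.injEq]
  split_ifs with h1 h2 <;> simp_all <;> tauto

theorem deltaB_eq (m : String) :
    deltaB m = (if m = "<" then ((-1 : Int), (0 : Int)) else if m = ">" then (1, 0)
      else if m = "^" then (0, 1) else if m = "v" then (0, -1) else (0, 0)) := by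
  have h : PySem.Dict.ofList [("<", ((-1 : Int), (0 : Int))), (">", (1, 0)), ("^", (0, 1)), ("v", (0, -1))]
      = PySem.Dict.mk [("<", ((-1 : Int), (0 : Int))), (">", (1, 0)), ("^", (0, 1)), ("v", (0, -1))] := by
    decide
  by_cases h1 : m = "<"
  · subst h1; decide
  by_cases h2 : m = ">"
  · subst h2; decide
  by_cases h3 : m = "^"
  · subst h3; decide
  by_cases h4 : m = "v"
  · subst h4; decide
  rw [if_neg h1, if_neg h2, if_neg h3, if_neg h4]
  simp only [deltaB, PySem.Dict.getD, h, PySem.Dict.get?_mk_cons, beq_iff_eq]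
  rw [if_neg (fun e => h1 e.symm), if_neg (fun e => h2 e.symm),
    if_neg (fun e => h3 e.symm), if_neg (fun e => h4 e.symm)]
  rfl

theorem beweeg_delta (x y : Int) (m : String) :
    beweegA (x, y) m = (x + (deltaB m).1, y + (deltaB m).2) := by
  simp only [beweegA, deltaB_eq]
  split_ifs <;> simp <;> ring

theorem stopB_pos (l : List String) (h : l ≠ []) : 1 ≤ stopB l := by
  match l with
  | [_] => simp [stopB]
  | a :: b :: r => simp only [stopB]; split <;> omega

theorem fold_shift (l : List String) (x y : Int) :
    l.foldl (fun (q : Int × Int) m => (q.1 + (deltaB m).1, q.2 + (deltaB m).2)) (x, y)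
      = (x + (sumB l).1, y + (sumB l).2) := by
  induction l generalizing x y with
  | nil => simp [sumB]
  | cons m t ih =>
    simp only [sumB, List.foldl_cons] at *
    rw [ih, ih ((0:Int) + (deltaB m).1)]
    simp only [Prod.mk.injEq]
    constructor <;> ring

theorem getD_of_drop (bew : List String) (n : Nat) (a : String) (rest : List String)
    (h : bew.drop n = a :: rest) : bew[n]?.getD "" = a := by
  have h0 : bew[n + 0]? = some a := by
    rw [← List.getElem?_drop, h]; rfl
  simp at h0
  simp [h0]

theorem loopA_eq (rest : List String) : ∀ (bew : List String) (i : Nat) (a : String) (x y : Int),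
    1 ≤ i → bew.drop (i - 1) = a :: rest →
    loopA bew x y i =
      (((i - 1 + stopB (a :: rest) : Nat) : Int),
        x + (sumB (rest.take (stopB (a :: rest) - 1))).1,
        y + (sumB (rest.take (stopB (a :: rest) - 1))).2) := by
  induction rest with
  | nil =>
    intro bew i a x y hi hdrop
    have hlen : bew.length = i := by
      have := congrArg List.length hdrop
      simp [List.length_drop] at this
      omega
    rw [loopA]
    have hneg : ¬ (i < bew.length ∧ teruggekeerdA (bew[i - 1]?.getD "") (bew[i]?.getD "") = false) := by
      intro ⟨h1, _⟩; omega
    rw [dif_neg hneg]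
    simp only [stopB, sumB, List.take_nil, List.foldl_nil, Prod.mk.injEq]
    refine ⟨by omega, by ring, by ring⟩
  | cons b rest' ih =>
    intro bew i a x y hi hdrop
    have hlen : i < bew.length := by
      have := congrArg List.length hdrop
      simp [List.length_drop] at this
      omega
    have ha : bew[i - 1]?.getD "" = a := getD_of_drop bew (i - 1) a (b :: rest') hdrop
    have hdrop' : bew.drop i = b :: rest' := by
      have h1 : bew.drop (i - 1 + 1) = (bew.drop (i - 1)).tail := by
        rw [← List.drop_drop]; simp
      have hi1 : i - 1 + 1 = i := by omega
      rw [hi1] at h1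
      rw [h1, hdrop]; rfl
    have hb : bew[i]?.getD "" = b := getD_of_drop bew i b rest' hdrop'
    rw [loopA]
    by_cases hrev : isRevB a b = true
    · have hneg : ¬ (i < bew.length ∧ teruggekeerdA (bew[i - 1]?.getD "") (bew[i]?.getD "") = false) := by
        rintro ⟨_, h2⟩
        rw [ha, hb, terug_eq_isRev, hrev] at h2
        exact absurd h2 (by simp)
      rw [dif_neg hneg]
      simp only [stopB, hrev, if_true, sumB, Prod.mk.injEq]
      refine ⟨by omega, by simp, by simp⟩
    · have hcond : i < bew.length ∧ teruggekeerdA (bew[i - 1]?.getD "") (bew[i]?.getD "") = false := by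
        refine ⟨hlen, ?_⟩
        rw [ha, hb, terug_eq_isRev]
        simpa using hrev
      rw [dif_pos hcond]
      rw [hb, beweeg_delta]
      have hih := ih bew (i + 1) b (x + (deltaB b).1) (y + (deltaB b).2) (by omega)
        (by simpa using hdrop')
      rw [hih]
      have hs' : 1 ≤ stopB (b :: rest') := stopB_pos _ (by simp)
      have hstop : stopB (a :: b :: rest') = 1 + stopB (b :: rest') := by
        simp [stopB, hrev]
      rw [hstop]
      have htake : (b :: rest').take (1 + stopB (b :: rest') - 1)
          = b :: rest'.take (stopB (b :: rest') - 1) := by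
        have h1 : 1 + stopB (b :: rest') - 1 = stopB (b :: rest') := by omega
        rw [h1]
        cases h2 : stopB (b :: rest') with
        | zero => omega
        | succ k => simp
      rw [htake]
      have hsum : sumB (b :: rest'.take (stopB (b :: rest') - 1))
          = ((deltaB b).1 + (sumB (rest'.take (stopB (b :: rest') - 1))).1,
             (deltaB b).2 + (sumB (rest'.take (stopB (b :: rest') - 1))).2) := by
        simp only [sumB, List.foldl_cons]
        rw [fold_shift]
        simp [sumB]
      rw [hsum]
      simp only [Prod.mk.injEq]
      refine ⟨by push_cast; omega, by ring, by ring⟩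

-- ===== VERDICT (by name: the statement is the Claim_ definition above) =====
theorem laatste_levende_positie_spec : Claim_equal_laatste_levende_positie := by
  intro bew _ hpre
  unfold Spec_laatste_levende_positie
  match bew, hpre with
  | m :: t, _ =>
    show loopA (m :: t) (beweegA (0, 0) m).1 (beweegA (0, 0) m).2 1
      = laatste_levende_positie_alt (m :: t)
    rw [beweeg_delta]
    rw [loopA_eq t (m :: t) 1 m _ _ (by omega) (by simp)]
    have hs : 1 ≤ stopB (m :: t) := stopB_pos _ (by simp)
    have htake : (m :: t).take (stopB (m :: t)) = m :: t.take (stopB (m :: t) - 1) := by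
      cases h : stopB (m :: t) with
      | zero => omega
      | succ k => simp
    simp only [laatste_levende_positie_alt, htake, List.foldl_cons]
    rw [fold_shift]
    simp only [Prod.mk.injEq, sumB]
    exact ⟨by push_cast; ring, trivial⟩
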